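-- pv_equiv track=rewrite | github.com/denovochem/cholla_chem | tests/test_ocr_map_consistency.py | generate_substitution_dict
-- ===== SOURCE A (Python) =====
-- from collections import deque
-- from typing import Dict, List, Set
--
-- def generate_substitution_dict(
--     word: str, substitutions: Dict[str, List[str]], max_edits: int = 1
-- ) -> Set[str]:
--     """Generate all possible OCR/typo error variants of a word."""
--     results = set()
--     queue = deque([(word, 0)])
--     visited = {word}
--
--     while queue:
--         current_s, depth = queue.popleft()
--         if depth >= max_edits:
--             continue
--
--         for i in range(len(current_s)):
--             for key, replacements in substitutions.items():
--                 key_len = len(key)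
--                 if i + key_len > len(current_s):
--                     continue
--
--                 if current_s[i : i + key_len] == key:
--                     for replacement in replacements:
--                         prefix = current_s[:i]
--                         suffix = current_s[i + key_len :]
--                         new_candidate = prefix + replacement + suffix
--
--                         if new_candidate not in visited:
--                             visited.add(new_candidate)
--                             results.add(new_candidate)
--                             queue.append((new_candidate, depth + 1))
--     return results
-- ===== SOURCE B (Python) =====
-- def generate_substitution_dict(word, substitutions, max_edits=1):
--     """Generate all possible OCR/typo error variants of a word.
--
--     Saturation of an insertion-ordered key set (a dict) instead of a BFS
--     queue: repeatedly merge into `reach` every one-step substitution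
--     expansion of every member, stopping after max_edits rounds or at a
--     fixpoint, then return everything but the original word.  Correct
--     because after k rounds `reach` holds exactly the strings within k
--     substitution edits of word, which is also what A's queue/visited/
--     results bookkeeping computes.
--     """
--     reach = dict.fromkeys([word])
--     for _ in range(max_edits):
--         before = len(reach)
--         reach.update((c, None)
--                      for s in list(reach)
--                      for i in range(len(s))
--                      for k, reps in substitutions.items()
--                      if s[i:i + len(k)] == k
--                      for r in reps
--                      for c in [s[:i] + r + s[i + len(k):]])
--         if len(reach) == before:
--             break
--     return {v for v in reach if v != word}
-- ===== Notes on version B (the rewrite author's own statement) =====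
-- stated objective: alternative
-- what changed: Replaces the deque-based BFS with visited/results bookkeeping by saturation of one insertion-ordered key set: rounds of 'reach |= one-step expansions of every member of reach' until max_edits rounds or a fixpoint, then return reach minus the original word; no queue, no depth tags, no separate visited or results sets.
import Mathlib
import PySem

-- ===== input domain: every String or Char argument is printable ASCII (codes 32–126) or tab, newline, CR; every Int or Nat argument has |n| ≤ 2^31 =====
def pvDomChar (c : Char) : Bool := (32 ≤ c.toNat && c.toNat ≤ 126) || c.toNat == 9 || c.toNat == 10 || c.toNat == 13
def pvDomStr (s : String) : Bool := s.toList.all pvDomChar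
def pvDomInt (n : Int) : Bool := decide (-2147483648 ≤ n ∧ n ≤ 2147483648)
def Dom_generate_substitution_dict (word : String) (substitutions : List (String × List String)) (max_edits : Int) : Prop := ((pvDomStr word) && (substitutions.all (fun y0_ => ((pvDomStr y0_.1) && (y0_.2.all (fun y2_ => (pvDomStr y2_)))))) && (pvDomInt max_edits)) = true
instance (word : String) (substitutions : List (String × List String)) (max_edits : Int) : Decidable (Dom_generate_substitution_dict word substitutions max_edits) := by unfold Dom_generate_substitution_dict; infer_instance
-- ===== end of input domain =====

-- B replaces A's deque-BFS with visited/results bookkeeping by pure set saturation: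
-- max_edits rounds of 'reach |= one-step expansions of every member of reach', then reach - {word}.

-- ===== PORT A =====
-- A's deque is ported as a two-list FIFO queue (front popped, back appended); the Nat fuel
-- argument only bounds the number of front/back flips and is a totality guard.

-- expansion of one popped node (current_s, depth): the three nested loops of A's body,
-- threading (queue-back, visited, results)
def pvNodeA (substitutions : List (String × List String)) (s : String) (d : Int)
    (st : List (String × Int) × PySem.Set String × PySem.Set String) :
    List (String × Int) × PySem.Set String × PySem.Set String :=
  (PySem.List.pyRange 0 (PySem.Str.len s) 1).foldl (fun st i =>
    substitutions.foldl (fun st kv =>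
      let klen := PySem.Str.len kv.1
      if PySem.Str.len s < i + klen then st        -- 'if i + key_len > len(current_s): continue'
      else if PySem.Str.slice s (some i) (some (i + klen)) == kv.1 then
        kv.2.foldl (fun st rep =>
          let cand := PySem.Str.slice s none (some i) ++ rep ++
                      PySem.Str.slice s (some (i + klen)) none
          if PySem.Set.contains st.2.1 cand then st
          else (st.1 ++ [(cand, d + 1)], PySem.Set.add st.2.1 cand, PySem.Set.add st.2.2 cand)) st
      else st) st) st

-- the 'while queue:' loop; queue = front ++ back
def pvLoopA (substitutions : List (String × List String)) (max_edits : Int) :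
    Nat → List (String × Int) → List (String × Int) →
    PySem.Set String → PySem.Set String → List String
  | _, [], [], _, results => results
  | 0, [], _, _, results => results
  | fuel + 1, [], back, visited, results => pvLoopA substitutions max_edits fuel back [] visited results
  | fuel, (s, d) :: front, back, visited, results =>
      if max_edits ≤ d then pvLoopA substitutions max_edits fuel front back visited results
      else
        let st := pvNodeA substitutions s d (back, visited, results)
        pvLoopA substitutions max_edits fuel front st.1 st.2.1 st.2.2
  termination_by fuel front => (fuel, front.length)
  decreasing_by
  · exact Prod.Lex.left _ _ (Nat.lt_succ_self _)
  · exact Prod.Lex.right _ (Nat.lt_succ_self _)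
  · exact Prod.Lex.right _ (Nat.lt_succ_self _)

def generate_substitution_dict (word : String) (substitutions : List (String × List String)) (max_edits : Int) : List String :=
  pvLoopA substitutions max_edits (max_edits.toNat + 1) [(word, 0)] []
    (PySem.Set.ofList [word]) PySem.Set.empty

-- ===== PORT B =====
-- the list comprehension: all one-step expansions of s, in scan order
def pvCands (substitutions : List (String × List String)) (s : String) : List String :=
  (PySem.List.pyRange 0 (PySem.Str.len s) 1).flatMap (fun i =>
    substitutions.flatMap (fun kv =>
      if PySem.Str.slice s (some i) (some (i + PySem.Str.len kv.1)) == kv.1 then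
        kv.2.map (fun r => PySem.Str.slice s none (some i) ++ r ++
                           PySem.Str.slice s (some (i + PySem.Str.len kv.1)) none)
      else []))

-- 'reach' is a dict used as an insertion-ordered set of keys (every value is None); its key
-- sequence is modelled as PySem.Set.  'reach.update((c, None) for ...)' appends the new keys
-- in candidate order and leaves existing keys in place = PySem.Set.update.
-- 'for _ in range(max_edits): before = len(reach); reach.update(...); if len(reach) == before: break' 
def pvSatur (substitutions : List (String × List String)) :
    Nat → PySem.Set String → PySem.Set String
  | 0, reach => reach
  | n + 1, reach =>
      let before := PySem.Set.len reach
      let reach' := PySem.Set.update reach (reach.flatMap (pvCands substitutions))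
      if PySem.Set.len reach' == before then reach'
      else pvSatur substitutions n reach' 

-- '{v for v in reach if v != word}': the keys in insertion order, minus the original word
def generate_substitution_dict_alt (word : String) (substitutions : List (String × List String)) (max_edits : Int) : List String :=
  (pvSatur substitutions max_edits.toNat (PySem.Set.ofList [word])).filter
    (fun v => !(v == word))

-- ===== PRECONDITION & SPEC =====
def Spec_generate_substitution_dict (word : String) (substitutions : List (String × List String)) (max_edits : Int) (out : List String) : Prop := out = generate_substitution_dict_alt word substitutions max_edits
instance (word : String) (substitutions : List (String × List String)) (max_edits : Int) (out : List String) : Decidable (Spec_generate_substitution_dict word substitutions max_edits out) := by unfold Spec_generate_substitution_dict; infer_instance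

-- ===== CLAIM (what is proved, stated in full; the proofs are below) =====
def Claim_equal_generate_substitution_dict : Prop := ∀ (word : String) (substitutions : List (String × List String)) (max_edits : Int), Dom_generate_substitution_dict word substitutions max_edits → Spec_generate_substitution_dict word substitutions max_edits (generate_substitution_dict word substitutions max_edits)

-- ===== LEMMAS AND PROOFS =====

-- A's per-candidate body, as a step function on (queue-back, visited, results)
def pvStepA (d : Int)
    (st : List (String × Int) × PySem.Set String × PySem.Set String) (c : String) :
    List (String × Int) × PySem.Set String × PySem.Set String :=
  if PySem.Set.contains st.2.1 c then st
  else (st.1 ++ [(c, d + 1)], PySem.Set.add st.2.1 c, PySem.Set.add st.2.2 c)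

-- the elements of l that are NEW w.r.t. seen, dedup'd left to right
def pvNews (seen : PySem.Set String) : List String → List String
  | [] => []
  | c :: l => if PySem.Set.contains seen c then pvNews seen l
              else c :: pvNews (seen ++ [c]) l

-- A's bounds guard is redundant: when i + len(key) overruns the string, the slice is shorter
-- than key, so the slice comparison fails anyway
theorem pvGuardRedundant (s key : String) (i : Int) (h0 : 0 ≤ i)
    (hi : i < PySem.Str.len s)
    (hg : PySem.Str.len s < i + PySem.Str.len key) :
    (PySem.Str.slice s (some i) (some (i + PySem.Str.len key)) == key) = false := by
  rw [beq_eq_false_iff_ne]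
  intro heq
  have hlen : (PySem.Str.slice s (some i) (some (i + PySem.Str.len key))).toList.length
      = key.toList.length := by rw [heq]
  rw [PySem.Str.toList_slice] at hlen
  simp only [PySem.Str.len_eq] at hg hi
  have hb : (0 : Int) ≤ i + PySem.Str.len key := by
    simp only [PySem.Str.len_eq]; omega
  have hsl : PySem.Chars.slice s.toList (some i) (some (i + PySem.Str.len key))
      = (s.toList.drop i.toNat).take ((i + PySem.Str.len key).toNat - i.toNat) := by
    show PySem.List.slice _ _ _ = _
    exact PySem.List.slice_toNat _ h0 hb
  rw [hsl] at hlen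
  simp only [List.length_take, List.length_drop, PySem.Str.len_eq] at hlen
  simp only [PySem.Str.len_eq] at hb
  omega

-- A's node expansion is the fold of pvStepA over B's candidate list
theorem pvNodeA_eq (subs : List (String × List String)) (s : String) (d : Int)
    (st : List (String × Int) × PySem.Set String × PySem.Set String) :
    pvNodeA subs s d st = (pvCands subs s).foldl (pvStepA d) st := by
  unfold pvNodeA pvCands
  rw [List.foldl_flatMap]
  refine PySem.List.foldl_congr_mem _ _ _ _ ?_
  intro acc i hi
  obtain ⟨hi0, hilt⟩ := PySem.List.mem_pyRange_one.mp hi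
  rw [List.foldl_flatMap]
  refine PySem.List.foldl_congr_mem _ _ _ _ ?_
  intro acc kv _
  by_cases hg : PySem.Str.len s < i + PySem.Str.len kv.1
  · simp only [hg, if_true, pvGuardRedundant s kv.1 i hi0 hilt hg, Bool.false_eq_true,
      if_false, List.foldl_nil]
  · simp only [hg, if_false]
    by_cases hs : (PySem.Str.slice s (some i) (some (i + PySem.Str.len kv.1)) == kv.1) = true
    · simp only [hs, if_true, List.foldl_map, pvStepA]
    · simp only [hs, Bool.false_eq_true, if_false, List.foldl_nil]

-- folding pvStepA appends exactly the new elements, to all three components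
theorem pvFoldTri (d : Int) :
    ∀ (l : List String) (back : List (String × Int)) (seen res : PySem.Set String),
      (∀ c, c ∈ res → c ∈ seen) →
      l.foldl (pvStepA d) (back, seen, res)
        = (back ++ (pvNews seen l).map (fun c => (c, d + 1)),
           seen ++ pvNews seen l, res ++ pvNews seen l) := by
  intro l
  induction l with
  | nil => intro back seen res _; simp [pvNews]
  | cons c l ih =>
      intro back seen res hres
      by_cases hc : PySem.Set.contains seen c = true
      · simp only [List.foldl_cons, pvStepA, hc, if_true, pvNews]
        exact ih back seen res hres
      · have hcres : PySem.Set.contains res c = false := by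
          rw [Bool.eq_false_iff]
          intro hmem
          exact hc ((PySem.Set.contains_iff seen c).mpr
            (hres c ((PySem.Set.contains_iff res c).mp hmem)))
        have hcm : c ∉ seen := fun h => hc ((PySem.Set.contains_iff seen c).mpr h)
        have hcr : c ∉ res := fun h => hres c h |> fun h' => hcm h'
        have hadds : PySem.Set.add seen c = seen ++ [c] := PySem.Set.add_of_not_mem hcm
        have haddr : PySem.Set.add res c = res ++ [c] := PySem.Set.add_of_not_mem hcr
        simp only [List.foldl_cons, pvStepA, hc, Bool.false_eq_true, if_false, hadds, haddr,
          pvNews, List.map_cons]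
        rw [ih (back ++ [(c, d + 1)]) (seen ++ [c]) (res ++ [c]) ?_]
        · simp [List.append_assoc]
        · intro x hx
          rcases List.mem_append.mp hx with h | h
          · exact List.mem_append.mpr (Or.inl (hres x h))
          · exact List.mem_append.mpr (Or.inr h)

-- Set.update appends exactly the new elements
theorem pvUpdate_eq (l : List String) :
    ∀ (seen : PySem.Set String), PySem.Set.update seen l = seen ++ pvNews seen l := by
  induction l with
  | nil => intro seen; simp [PySem.Set.update, pvNews]
  | cons c l ih =>
      intro seen
      by_cases hc : PySem.Set.contains seen c = true
      · have : PySem.Set.add seen c = seen :=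
          PySem.Set.add_of_mem ((PySem.Set.contains_iff seen c).mp hc)
        simp only [PySem.Set.update, List.foldl_cons, this, pvNews, hc, if_true]
        exact ih seen
      · have hadd : PySem.Set.add seen c = seen ++ [c] :=
          PySem.Set.add_of_not_mem (fun h => hc ((PySem.Set.contains_iff seen c).mpr h))
        simp only [PySem.Set.update, List.foldl_cons, hadd, pvNews, hc, Bool.false_eq_true,
          if_false]
        rw [show List.foldl PySem.Set.add (seen ++ [c]) l = PySem.Set.update (seen ++ [c]) l
            from rfl, ih (seen ++ [c])]
        simp [List.append_assoc]

theorem pvNews_append (l₁ l₂ : List String) :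
    ∀ (seen : PySem.Set String),
      pvNews seen (l₁ ++ l₂) = pvNews seen l₁ ++ pvNews (seen ++ pvNews seen l₁) l₂ := by
  induction l₁ with
  | nil => intro seen; simp [pvNews]
  | cons c l ih =>
      intro seen
      by_cases hc : PySem.Set.contains seen c = true
      · simp only [List.cons_append, pvNews, hc, if_true]; exact ih seen
      · simp only [List.cons_append, pvNews, hc, Bool.false_eq_true, if_false]
        rw [ih (seen ++ [c])]
        simp [List.append_assoc]

theorem pvNews_nil_of_mem (l : List String) :
    ∀ (seen : PySem.Set String), (∀ c ∈ l, c ∈ seen) → pvNews seen l = [] := by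
  induction l with
  | nil => intro seen _; rfl
  | cons c l ih =>
      intro seen h
      have hc : PySem.Set.contains seen c = true :=
        (PySem.Set.contains_iff seen c).mpr (h c List.mem_cons_self)
      simp only [pvNews, hc, if_true]
      exact ih seen (fun x hx => h x (List.mem_cons_of_mem _ hx))

theorem pvMem_news (l : List String) :
    ∀ (seen : PySem.Set String) (c : String), c ∈ l → c ∈ seen ++ pvNews seen l := by
  induction l with
  | nil => intro _ _ h; cases h
  | cons c l ih =>
      intro seen x hx
      by_cases hc : PySem.Set.contains seen c = true
      · simp only [pvNews, hc, if_true]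
        rcases List.mem_cons.mp hx with rfl | hx
        · exact List.mem_append.mpr (Or.inl ((PySem.Set.contains_iff seen x).mp hc))
        · exact ih seen x hx
      · simp only [pvNews, hc, Bool.false_eq_true, if_false]
        rcases List.mem_cons.mp hx with rfl | hx
        · exact List.mem_append.mpr (Or.inr List.mem_cons_self)
        · have := ih (seen ++ [c]) x hx
          rw [List.append_assoc] at this
          simpa using this
          
theorem pvNodup_news (seen : PySem.Set String) (l : List String) (h : seen.Nodup) :
    (seen ++ pvNews seen l).Nodup := by
  rw [← pvUpdate_eq]
  exact PySem.Set.nodup_update seen l h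

-- the closure invariant: every already-expanded string has all its candidates inside the set
def pvInv (subs : List (String × List String)) (pre ls : List String) : Prop :=
  ∀ s ∈ pre, ∀ c ∈ pvCands subs s, c ∈ pre ++ ls

-- one saturation round only adds the news of the frontier part
theorem pvRound_eq (subs : List (String × List String)) (pre ls : List String)
    (hinv : pvInv subs pre ls) :
    PySem.Set.update (pre ++ ls) ((pre ++ ls).flatMap (pvCands subs))
      = (pre ++ ls) ++ pvNews (pre ++ ls) (ls.flatMap (pvCands subs)) := by
  rw [pvUpdate_eq, List.flatMap_append, pvNews_append]
  have h1 : pvNews (pre ++ ls) (pre.flatMap (pvCands subs)) = [] := by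
    refine pvNews_nil_of_mem _ _ ?_
    intro c hc
    obtain ⟨s, hs, hcs⟩ := List.mem_flatMap.mp hc
    exact hinv s hs c hcs
  rw [h1]
  simp

-- queue pops of nodes at depth ≥ max_edits are skipped
theorem pvLoopA_skip (subs : List (String × List String)) (me d : Int) (hd : me ≤ d) :
    ∀ (ls : List String) (fuel : Nat) (back : List (String × Int))
      (v r : PySem.Set String),
      pvLoopA subs me fuel (ls.map (fun s => (s, d))) back v r =
      pvLoopA subs me fuel [] back v r := by
  intro ls
  induction ls with
  | nil => intro fuel back v r; rfl
  | cons x xs ih =>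
      intro fuel back v r
      rw [List.map_cons, pvLoopA]
      simp only [hd, if_true]
      exact ih fuel back v r

-- processing a whole level: popping each node of depth d < max_edits in turn is the level fold
theorem pvLoopA_level (subs : List (String × List String)) (me d : Int) (hd : ¬ me ≤ d) :
    ∀ (ls : List String) (fuel : Nat) (back : List (String × Int))
      (v r : PySem.Set String),
      pvLoopA subs me fuel (ls.map (fun s => (s, d))) back v r =
      pvLoopA subs me fuel []
        (ls.foldl (fun st s => pvNodeA subs s d st) (back, v, r)).1
        (ls.foldl (fun st s => pvNodeA subs s d st) (back, v, r)).2.1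
        (ls.foldl (fun st s => pvNodeA subs s d st) (back, v, r)).2.2 := by
  intro ls
  induction ls with
  | nil => intro fuel back v r; rfl
  | cons x xs ih =>
      intro fuel back v r
      rw [List.map_cons, pvLoopA]
      simp only [hd, if_false, List.foldl_cons]
      exact ih fuel _ _ _

-- main bridge: the BFS loop on the level tagged me - n computes the last n saturation
-- rounds' worth of new strings
theorem pvBridge (subs : List (String × List String)) (me : Int) :
    ∀ (n : Nat) (pre ls res : List String),
      (pre ++ ls).Nodup → pvInv subs pre ls → (∀ c ∈ res, c ∈ pre ++ ls) →
      ∃ X, pvSatur subs n (pre ++ ls) = (pre ++ ls) ++ X ∧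
        pvLoopA subs me (n + 1) (ls.map (fun s => (s, me - (n : Int)))) []
          (pre ++ ls) res = res ++ X := by
  intro n
  induction n with
  | zero =>
      intro pre ls res _ _ _
      refine ⟨[], by simp [pvSatur], ?_⟩
      simp only [Nat.cast_zero, sub_zero]
      rw [pvLoopA_skip subs me me le_rfl]
      simp [pvLoopA]
  | succ n ih =>
      intro pre ls res hnd hinv hres
      have hd : ¬ me ≤ me - ((n : Int) + 1) := by omega
      have hcast : ((n + 1 : Nat) : Int) = (n : Int) + 1 := by push_cast; ring
      rw [hcast, pvLoopA_level subs me _ hd]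
      set seen := pre ++ ls with hseen
      set X₁ := pvNews seen (ls.flatMap (pvCands subs)) with hX₁
      have hfold : ls.foldl (fun st s => pvNodeA subs s (me - ((n : Int) + 1)) st)
          (([] : List (String × Int)), seen, res)
          = (X₁.map (fun c => (c, me - ((n : Int) + 1) + 1)), seen ++ X₁, res ++ X₁) := by
        have h1 : ls.foldl (fun st s => pvNodeA subs s (me - ((n : Int) + 1)) st)
            (([] : List (String × Int)), seen, res)
            = (ls.flatMap (pvCands subs)).foldl (pvStepA (me - ((n : Int) + 1)))
              (([] : List (String × Int)), seen, res) := by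
          rw [List.foldl_flatMap]
          exact PySem.List.foldl_congr_mem _ _ _ _ (fun acc s _ => pvNodeA_eq subs s _ acc)
        rw [h1, pvFoldTri _ _ _ _ _ hres, ← hX₁]
        simp
      -- round invariants for the inner level
      have hnd' : (seen ++ X₁).Nodup := pvNodup_news seen _ hnd
      have hinv' : pvInv subs seen X₁ := by
        intro s hs c hc
        rcases List.mem_append.mp hs with h | h
        · exact List.mem_append.mpr (Or.inl (hinv s h c hc))
        · exact pvMem_news _ seen c (List.mem_flatMap.mpr ⟨s, h, hc⟩)
      have hres' : ∀ c ∈ res ++ X₁, c ∈ seen ++ X₁ := by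
        intro c hc
        rcases List.mem_append.mp hc with h | h
        · exact List.mem_append.mpr (Or.inl (hres c h))
        · exact List.mem_append.mpr (Or.inr h)
      have hupd : PySem.Set.update seen (seen.flatMap (pvCands subs)) = seen ++ X₁ := by
        rw [hseen, pvRound_eq subs pre ls hinv, ← hseen, ← hX₁]
      have hsatur : pvSatur subs (n + 1) seen =
          if PySem.Set.len (seen ++ X₁) == PySem.Set.len seen then seen ++ X₁
          else pvSatur subs n (seen ++ X₁) := by
        simp only [pvSatur]
        rw [hupd]
      have htag : me - ((n : Int) + 1) + 1 = me - (n : Int) := by ring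
      cases hX : X₁ with
      | nil =>
          refine ⟨[], ?_, ?_⟩
          · rw [hX] at hsatur
            rw [hsatur]
            simp
          · rw [hfold]
            show pvLoopA subs me (n + 1 + 1) []
                (X₁.map (fun c => (c, me - ((n : Int) + 1) + 1))) (seen ++ X₁) (res ++ X₁)
                = res ++ []
            rw [hX]
            simp only [List.map_nil, List.append_nil]
            rw [pvLoopA]
      | cons c cs =>
          have hcond : (PySem.Set.len (seen ++ X₁) == PySem.Set.len seen) = false := by
            rw [beq_eq_false_iff_ne, hX]
            simp only [PySem.Set.len, List.length_append, List.length_cons]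
            intro h
            omega
          have hsat2 : pvSatur subs (n + 1) seen = pvSatur subs n (seen ++ X₁) := by
            rw [hsatur, hcond]
            simp
          obtain ⟨X₂, hs2, hl2⟩ := ih seen X₁ (res ++ X₁) hnd' hinv' hres'
          refine ⟨X₁ ++ X₂, ?_, ?_⟩
          · rw [hsat2, hs2, List.append_assoc]
          · rw [hfold]
            show pvLoopA subs me (n + 1 + 1) []
                (X₁.map (fun c => (c, me - ((n : Int) + 1) + 1))) (seen ++ X₁) (res ++ X₁)
                = res ++ (X₁ ++ X₂)
            simp only [htag]
            have hflip : pvLoopA subs me (n + 1 + 1) []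
                ((c :: cs).map (fun c => (c, me - (n : Int)))) (seen ++ (c :: cs))
                  (res ++ (c :: cs))
                = pvLoopA subs me (n + 1) ((c :: cs).map (fun c => (c, me - (n : Int)))) []
                  (seen ++ (c :: cs)) (res ++ (c :: cs)) := by
              rw [List.map_cons, pvLoopA]
              simp
            rw [hX] at hl2 ⊢
            rw [hflip, hl2, List.append_assoc]

theorem pvSatur_nodup (subs : List (String × List String)) :
    ∀ (n : Nat) (s : PySem.Set String), s.Nodup → (pvSatur subs n s).Nodup := by
  intro n
  induction n with
  | zero => intro s h; exact h
  | succ n ih =>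
      intro s h
      simp only [pvSatur]
      split
      · exact PySem.Set.nodup_update s _ h
      · exact ih _ (PySem.Set.nodup_update s _ h)

-- word is not re-listed in the final filter
theorem pvFilter_cons (w : String) (X : List String) (hw : w ∉ X) :
    (w :: X).filter (fun v => !(v == w)) = X := by
  rw [List.filter_cons]
  simp only [beq_self_eq_true, Bool.not_true, Bool.false_eq_true, if_false]
  refine List.filter_eq_self.mpr ?_
  intro x hx
  have hxw : x ≠ w := fun h => hw (h ▸ hx)
  simp [hxw]

-- ===== VERDICT (by name: the statement is the Claim_ definition above) =====
theorem generate_substitution_dict_spec : Claim_equal_generate_substitution_dict := by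
  unfold Claim_equal_generate_substitution_dict Spec_generate_substitution_dict
  intro word subs me _
  unfold generate_substitution_dict generate_substitution_dict_alt
  have hof : PySem.Set.ofList [word] = [word] := rfl
  by_cases hme : 0 ≤ me
  · obtain ⟨X, hs, hl⟩ := pvBridge subs me me.toNat [] [word] []
      (by simp) (by intro s hs; cases hs) (by intro c hc; cases hc)
    have h0 : me - (me.toNat : Int) = 0 := by omega
    have hmap : [(word, (0 : Int))] = [word].map (fun s => (s, me - (me.toNat : Int))) := by
      rw [h0]; rfl
    rw [hof, hmap, show (PySem.Set.empty : PySem.Set String) = [] from rfl]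
    simp only [List.nil_append] at hs hl
    rw [hl, hs]
    have hnd : (word :: X).Nodup := by
      have := pvSatur_nodup subs me.toNat [word] (by simp)
      rw [hs] at this
      simpa using this
    rw [show ([word] ++ X) = word :: X from rfl, pvFilter_cons word X
      (by simpa using (List.nodup_cons.mp hnd).1)]
  · have ht : me.toNat = 0 := by omega
    rw [ht, hof]
    have hmap : [(word, (0 : Int))] = [word].map (fun s => (s, (0 : Int))) := rfl
    rw [hmap, pvLoopA_skip subs me 0 (by omega),
      show (PySem.Set.empty : PySem.Set String) = [] from rfl, pvLoopA]
    rw [show pvSatur subs 0 [word] = [word] from rfl]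
    rw [List.filter_cons]
    simp only [beq_self_eq_true, Bool.not_true, Bool.false_eq_true, if_false, List.filter_nil]
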